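-- pv_equiv track=rewrite | github.com/dwisniewski/zed | scripts/zedSubProblemsGenerator_0_5.py | clusterData
-- ===== SOURCE A (Python) =====
-- def clusterData(data):
-- 	clusters = dict()
-- 	for item in data:
-- 		s = item.split(",")
-- 		cl = s[-1].split(" ")[1][:-1]
-- 		if cl in clusters.keys():
-- 			clusters[cl].append(item)
-- 		else:
-- 			clusters[cl] = [item]
-- 	return clusters
-- ===== SOURCE B (Python) =====
-- def clusterData(data):
-- 	def key(item):
-- 		return item.split(",")[-1].split(" ")[1][:-1]
-- 	ks = [key(item) for item in data]
-- 	return {k: [it for it, kk in zip(data, ks) if kk == k] for k in dict.fromkeys(ks)}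
-- ===== Notes on version B (the rewrite author's own statement) =====
-- stated objective: alternative
-- what changed: B precomputes every item's cluster key in one pass, deduplicates the keys in first-occurrence order, and builds each group by a per-key filter over the data, instead of A's incremental first-encounter dict insertion with per-item append.
import Mathlib
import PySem

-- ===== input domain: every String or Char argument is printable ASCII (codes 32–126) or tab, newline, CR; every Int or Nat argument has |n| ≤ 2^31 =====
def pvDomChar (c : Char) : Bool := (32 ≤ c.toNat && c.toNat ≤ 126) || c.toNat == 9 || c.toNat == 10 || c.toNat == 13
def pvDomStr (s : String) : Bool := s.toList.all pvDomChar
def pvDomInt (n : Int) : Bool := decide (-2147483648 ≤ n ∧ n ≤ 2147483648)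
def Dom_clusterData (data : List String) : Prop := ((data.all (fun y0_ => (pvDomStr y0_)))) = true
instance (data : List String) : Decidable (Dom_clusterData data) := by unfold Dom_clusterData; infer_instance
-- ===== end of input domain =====

-- B groups by precomputed deduplicated keys with a per-key filter instead of A's incremental dict append; equal output (incl. order) on Pre_.

-- ===== PORT A =====
-- the cluster key of one item: item.split(",")[-1].split(" ")[1][:-1]
-- (both Pythons compute it by this same expression; the .getD [] on split? only
--  discharges split?'s sep = "" case, which never occurs for the literal separators,
--  and pyGetD's defaults are only reached outside Pre_, where Python raises IndexError)
def pvKey (item : String) : String :=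
  let s := (PySem.Str.split? item ",").getD []
  let lastField := PySem.List.pyGetD s (-1) ""
  let w := PySem.List.pyGetD ((PySem.Str.split? lastField " ").getD []) 1 ""
  PySem.Str.slice w none (some (-1))

def clusterData (data : List String) : List (String × List String) :=
  (data.foldl
    (fun clusters item =>
      let cl := pvKey item
      if clusters.contains cl then
        clusters.insert cl (clusters.getD cl [] ++ [item])
      else
        clusters.insert cl [item])
    PySem.Dict.empty).items

-- ===== PORT B =====
def clusterData_alt (data : List String) : List (String × List String) :=
  let ks := data.map pvKey
  (PySem.Set.ofList ks).map
    (fun k => (k, ((data.zip ks).filter (fun p => p.2 == k)).map (·.1)))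

-- ===== PRECONDITION & SPEC =====
-- Pre_ excludes exactly the inputs on which Python A raises IndexError: an item whose
-- last comma-field contains no space makes split(" ")[1] raise.
def Pre_clusterData (data : List String) : Prop :=
  ∀ item ∈ data,
    2 ≤ ((PySem.Str.split? (PySem.List.pyGetD ((PySem.Str.split? item ",").getD []) (-1) "") " ").getD []).length
instance (data : List String) : Decidable (Pre_clusterData data) := by unfold Pre_clusterData; infer_instance

def pvWitness_clusterData : List String := ["a,x 1)", "b,y 22)", "c,x 9)"]

def Spec_clusterData (data : List String) (out : List (String × List String)) : Prop := out = clusterData_alt data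
instance (data : List String) (out : List (String × List String)) : Decidable (Spec_clusterData data out) := by unfold Spec_clusterData; infer_instance

-- ===== CLAIM (what is proved, stated in full; the proofs are below) =====
def Claim_equal_clusterData : Prop := ∀ (data : List String), Dom_clusterData data → Pre_clusterData data → Spec_clusterData data (clusterData data)

-- ===== LEMMAS AND PROOFS =====

theorem pv_zip_map {α β : Type} (l : List α) (f : α → β) :
    l.zip (l.map f) = l.map (fun x => (x, f x)) := by
  induction l with
  | nil => rfl
  | cons x xs ih => simp [ih]

-- A's loop body is exactly Dict.modify at the item's key
theorem pv_step_eq_modify (d : PySem.Dict String (List String)) (item : String) :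
    (let cl := pvKey item
     if d.contains cl then d.insert cl (d.getD cl [] ++ [item]) else d.insert cl [item])
    = d.modify (pvKey item) [] (· ++ [item]) := by
  by_cases h : d.contains (pvKey item)
  · simp [PySem.Dict.modify, h]
  · simp only [Bool.not_eq_true] at h
    simp [PySem.Dict.modify, h, PySem.Dict.getD_of_not_contains d [] h]

-- both sides are the dedup'd key list paired with per-key filters of data
theorem pv_main (data : List String) : clusterData data = clusterData_alt data := by
  unfold clusterData clusterData_alt
  have h1 : data.foldl
      (fun clusters item =>
        let cl := pvKey item
        if clusters.contains cl then clusters.insert cl (clusters.getD cl [] ++ [item])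
        else clusters.insert cl [item])
      PySem.Dict.empty
      = data.foldl (fun d item => d.modify (pvKey item) [] (· ++ [item])) PySem.Dict.empty := by
    have hf : (fun (clusters : PySem.Dict String (List String)) (item : String) =>
        let cl := pvKey item
        if clusters.contains cl then clusters.insert cl (clusters.getD cl [] ++ [item])
        else clusters.insert cl [item])
        = fun d item => d.modify (pvKey item) [] (· ++ [item]) :=
      funext fun d => funext fun it => pv_step_eq_modify d it
    rw [hf]
  rw [h1]
  set D := data.foldl (fun d item => d.modify (pvKey item) [] (· ++ [item])) PySem.Dict.empty with hD
  have hnd : D.keys.Nodup := by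
    rw [hD]
    exact PySem.Dict.nodup_keys_foldl_modify_key data pvKey [] (fun _ item v => v ++ [item])
      PySem.Dict.empty (by simp)
  have hkeys : D.keys = PySem.Set.ofList (data.map pvKey) := by
    rw [hD, PySem.Dict.keys_foldl_modify_key data pvKey [] (fun _ item v => v ++ [item])]
    simp [PySem.Dict.keys_empty, PySem.Set.update_nil_left]
  have hgetD : ∀ k, D.getD k [] = (data.filter (fun it => pvKey it == k)) := by
    intro k
    have := PySem.Dict.getD_foldl_modify_append
      (data.map (fun it => (pvKey it, it))) PySem.Dict.empty k
    rw [List.foldl_map] at this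
    simpa [List.filter_map, List.map_map, Function.comp_def] using this
  rw [PySem.Dict.items_eq_map_keys D hnd [], hkeys]
  apply List.map_congr_left
  intro k _
  rw [hgetD k]
  rw [pv_zip_map data pvKey]
  simp [List.filter_map, List.map_map, Function.comp_def]

-- ===== VERDICT (by name: the statement is the Claim_ definition above) =====
theorem clusterData_spec : Claim_equal_clusterData := by
  intro data _ _
  unfold Spec_clusterData
  exact pv_main data
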